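-- pv_equiv track=rewrite | github.com/anna-tarasidou/Complex_Data_Management | Merger_Valuation_Algorithms/merger_algorithms.py | sort_merge_semijoin
-- ===== SOURCE A (Python) =====
-- def sort_merge_semijoin(r, s, r_key_index=0, s_key_index=0):
--     # Sort-Merge
--     # r: airports : index 0
--     # s: routes : index 5
--
--     # Sort
--     sorted_r = sorted([row for row in r if len(row) > r_key_index], key=lambda x: str(x[r_key_index]))
--     sorted_s = sorted([row for row in s if len(row) > s_key_index], key=lambda x: str(x[s_key_index]))
--
--     result = []
--     i = 0  # pointer for r
--     j = 0  # pointer for s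
--
--     # Merge
--     while i < len(sorted_r) and j < len(sorted_s):
--         r_key = str(sorted_r[i][r_key_index])
--         s_key = str(sorted_s[j][s_key_index])
--
--         if r_key == s_key:
--             result.append(sorted_r[i])
--             i += 1
--         elif r_key < s_key:
--             i += 1
--         else:
--             j += 1
--
--     return result
-- ===== SOURCE B (Python) =====
-- def sort_merge_semijoin(r, s, r_key_index=0, s_key_index=0):
--     # Hash semijoin: collect the qualifying s keys once, then emit the
--     # qualifying r rows in stable key order via a single sort + set lookup.
--     s_keys = {str(row[s_key_index]) for row in s if len(row) > s_key_index}
--     candidates = sorted((row for row in r if len(row) > r_key_index),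
--                         key=lambda x: str(x[r_key_index]))
--     return [row for row in candidates if str(row[r_key_index]) in s_keys]
-- ===== Notes on version B (the rewrite author's own statement) =====
-- stated objective: alternative
-- what changed: Replaces the sort of s and the two-pointer merge loop with a hash set of qualifying s keys and a single membership-filtered pass over the sorted r candidates (hash semijoin instead of sort-merge semijoin).
import Mathlib
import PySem

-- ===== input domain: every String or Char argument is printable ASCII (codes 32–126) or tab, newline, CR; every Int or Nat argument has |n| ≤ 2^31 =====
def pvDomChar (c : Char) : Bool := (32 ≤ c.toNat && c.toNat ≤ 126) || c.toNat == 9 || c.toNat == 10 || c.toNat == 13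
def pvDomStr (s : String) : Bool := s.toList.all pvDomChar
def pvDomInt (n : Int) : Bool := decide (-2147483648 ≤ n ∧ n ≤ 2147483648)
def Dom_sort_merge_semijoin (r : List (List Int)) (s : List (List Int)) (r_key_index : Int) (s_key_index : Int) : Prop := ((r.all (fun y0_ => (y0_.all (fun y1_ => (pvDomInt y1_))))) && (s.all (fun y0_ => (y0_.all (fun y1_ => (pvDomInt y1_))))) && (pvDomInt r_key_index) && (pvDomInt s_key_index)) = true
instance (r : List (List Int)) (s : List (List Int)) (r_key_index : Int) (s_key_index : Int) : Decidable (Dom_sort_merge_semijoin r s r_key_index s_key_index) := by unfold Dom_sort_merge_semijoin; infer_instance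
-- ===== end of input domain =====

-- B replaces A's sort of s and two-pointer merge by a hash set of s keys and a
-- membership-filtered pass over the sorted r candidates (same result, alternative algorithm).


-- ===== PORT A =====
-- str(row[idx]) — total form of the Python index, exact under Pre_ (index in range)
def pvKey (idx : Int) (row : List Int) : String := PySem.Int.toStr (PySem.List.pyGetD row idx 0)

-- the while-loop of A: pointers i, j into the two sorted lists, accumulator `result`
def pvMergeLoop (sr ss : List (List Int)) (rki ski : Int) (i j : Nat) (result : List (List Int)) : List (List Int) :=
  if h : i < sr.length ∧ j < ss.length then
    let r_key := pvKey rki sr[i]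
    let s_key := pvKey ski ss[j]
    if r_key = s_key then pvMergeLoop sr ss rki ski (i + 1) j (result ++ [sr[i]])
    else if r_key < s_key then pvMergeLoop sr ss rki ski (i + 1) j result
    else pvMergeLoop sr ss rki ski i (j + 1) result
  else result
termination_by (sr.length - i) + (ss.length - j)
decreasing_by all_goals omega

def sort_merge_semijoin (r : List (List Int)) (s : List (List Int)) (r_key_index : Int) (s_key_index : Int) : List (List Int) :=
  let sorted_r := PySem.List.sorted (r.filter (fun row => decide (r_key_index < PySem.List.len row))) (fun x => pvKey r_key_index x) false
  let sorted_s := PySem.List.sorted (s.filter (fun row => decide (s_key_index < PySem.List.len row))) (fun x => pvKey s_key_index x) false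
  pvMergeLoop sorted_r sorted_s r_key_index s_key_index 0 0 []

-- ===== PORT B =====
def sort_merge_semijoin_alt (r : List (List Int)) (s : List (List Int)) (r_key_index : Int) (s_key_index : Int) : List (List Int) :=
  let s_keys : PySem.Set String := PySem.Set.ofList ((s.filter (fun row => decide (s_key_index < PySem.List.len row))).map (fun row => pvKey s_key_index row))
  let candidates := PySem.List.sorted (r.filter (fun row => decide (r_key_index < PySem.List.len row))) (fun x => pvKey r_key_index x) false
  candidates.filter (fun row => PySem.Set.contains s_keys (pvKey r_key_index row))

-- ===== PRECONDITION & SPEC =====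
-- Pre_ excludes exactly the inputs where Python raises IndexError: a negative key index
-- whose wraparound falls outside some row (the nonnegative case is guarded by the length filter).
def Pre_sort_merge_semijoin (r : List (List Int)) (s : List (List Int)) (r_key_index : Int) (s_key_index : Int) : Prop :=
  (0 ≤ r_key_index ∨ ∀ row ∈ r, -(row.length : Int) ≤ r_key_index) ∧
  (0 ≤ s_key_index ∨ ∀ row ∈ s, -(row.length : Int) ≤ s_key_index)
instance (r : List (List Int)) (s : List (List Int)) (r_key_index : Int) (s_key_index : Int) : Decidable (Pre_sort_merge_semijoin r s r_key_index s_key_index) := by unfold Pre_sort_merge_semijoin; infer_instance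

def pvWitness_sort_merge_semijoin : List (List Int) × List (List Int) × Int × Int :=
  ([[1], [2, 3], [2]], [[2, 9], [5]], 0, 0)

def Spec_sort_merge_semijoin (r : List (List Int)) (s : List (List Int)) (r_key_index : Int) (s_key_index : Int) (out : List (List Int)) : Prop := out = sort_merge_semijoin_alt r s r_key_index s_key_index
instance (r : List (List Int)) (s : List (List Int)) (r_key_index : Int) (s_key_index : Int) (out : List (List Int)) : Decidable (Spec_sort_merge_semijoin r s r_key_index s_key_index out) := by unfold Spec_sort_merge_semijoin; infer_instance

-- ===== CLAIM (what is proved, stated in full; the proofs are below) =====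
def Claim_equal_sort_merge_semijoin : Prop := ∀ (r : List (List Int)) (s : List (List Int)) (r_key_index : Int) (s_key_index : Int), Dom_sort_merge_semijoin r s r_key_index s_key_index → Pre_sort_merge_semijoin r s r_key_index s_key_index → Spec_sort_merge_semijoin r s r_key_index s_key_index (sort_merge_semijoin r s r_key_index s_key_index)

-- ===== LEMMAS AND PROOFS =====

-- structural (list-shaped) form of A's merge loop, used only by the proof
def pvMergeRec (kR kS : List Int → String) : List (List Int) → List (List Int) → List (List Int)
  | [], _ => []
  | _ :: _, [] => []
  | a :: as, b :: bs =>
    if kR a = kS b then a :: pvMergeRec kR kS as (b :: bs)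
    else if kR a < kS b then pvMergeRec kR kS as (b :: bs)
    else pvMergeRec kR kS (a :: as) bs
termination_by A B => A.length + B.length

lemma pvMergeLoop_eq_rec (sr ss : List (List Int)) (rki ski : Int) (i j : Nat) (res : List (List Int)) :
    pvMergeLoop sr ss rki ski i j res = res ++ pvMergeRec (pvKey rki) (pvKey ski) (sr.drop i) (ss.drop j) := by
  rw [pvMergeLoop]
  by_cases h : i < sr.length ∧ j < ss.length
  · obtain ⟨hi, hj⟩ := h
    rw [dif_pos ⟨hi, hj⟩, List.drop_eq_getElem_cons hi, List.drop_eq_getElem_cons hj, pvMergeRec]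
    dsimp only
    by_cases h1 : pvKey rki sr[i] = pvKey ski ss[j]
    · rw [if_pos h1, if_pos h1, pvMergeLoop_eq_rec, ← List.drop_eq_getElem_cons hj]
      simp
    · rw [if_neg h1, if_neg h1]
      by_cases h2 : pvKey rki sr[i] < pvKey ski ss[j]
      · rw [if_pos h2, if_pos h2, pvMergeLoop_eq_rec, ← List.drop_eq_getElem_cons hj]
      · rw [if_neg h2, if_neg h2, pvMergeLoop_eq_rec, ← List.drop_eq_getElem_cons hi]
  · rw [dif_neg h]
    rcases Nat.lt_or_ge i sr.length with hi | hi
    · have hj : ss.length ≤ j := by omega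
      rw [List.drop_eq_nil_of_le hj, List.drop_eq_getElem_cons hi, pvMergeRec]
      simp
    · rw [List.drop_eq_nil_of_le hi, pvMergeRec]
      simp
termination_by (sr.length - i) + (ss.length - j)
decreasing_by all_goals omega

lemma pvMergeRec_eq_filter (kR kS : List Int → String) :
    ∀ (A B : List (List Int)), A.Pairwise (fun a b => kR a ≤ kR b) → B.Pairwise (fun a b => kS a ≤ kS b) →
      pvMergeRec kR kS A B = A.filter (fun a => decide (kR a ∈ B.map kS))
  | [], B, _, _ => by rw [pvMergeRec.eq_1]; simp
  | a :: as, [], _, _ => by rw [pvMergeRec]; simp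
  | a :: as, b :: bs, hA, hB => by
    rw [pvMergeRec]
    have hAtail := hA.tail
    have hAhead : ∀ x ∈ as, kR a ≤ kR x := fun x hx => List.rel_of_pairwise_cons hA hx
    have hBhead : ∀ x ∈ bs, kS b ≤ kS x := fun x hx => List.rel_of_pairwise_cons hB hx
    by_cases h1 : kR a = kS b
    · -- match: a is kept
      rw [if_pos h1, pvMergeRec_eq_filter kR kS as (b :: bs) hAtail hB]
      simp [h1]
    · rw [if_neg h1]
      by_cases h2 : kR a < kS b
      · -- a's key is below every key of B: a is dropped
        rw [if_pos h2, pvMergeRec_eq_filter kR kS as (b :: bs) hAtail hB]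
        simp [List.filter_cons]
        exact ⟨h1, fun x hx hk => (ne_of_gt (lt_of_lt_of_le h2 (hBhead x hx))) hk⟩
      · -- b's key is below every key of a :: as: b matches nothing
        rw [if_neg h2]
        have hb : kS b < kR a := by
          rcases lt_trichotomy (kR a) (kS b) with h | h | h
          · exact absurd h h2
          · exact absurd h h1
          · exact h
        rw [pvMergeRec_eq_filter kR kS (a :: as) bs hA hB.tail]
        apply List.filter_congr
        intro x hx
        have hxk : kS b < kR x := by
          rcases List.mem_cons.mp hx with rfl | hx'
          · exact hb
          · exact lt_of_lt_of_le hb (hAhead x hx')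
        simp only [List.map_cons, List.mem_cons, decide_eq_decide]
        constructor
        · exact Or.inr
        · rintro (he | hm)
          · exact absurd he (ne_of_gt hxk)
          · exact hm

theorem sort_merge_semijoin_spec : Claim_equal_sort_merge_semijoin := by
  intro r s rki ski _ _
  unfold Spec_sort_merge_semijoin sort_merge_semijoin sort_merge_semijoin_alt
  dsimp only
  rw [pvMergeLoop_eq_rec]
  simp only [List.nil_append, List.drop_zero]
  rw [pvMergeRec_eq_filter _ _ _ _ (PySem.List.sorted_pairwise _ _) (PySem.List.sorted_pairwise _ _)]
  apply List.filter_congr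
  intro x _
  simp [PySem.Set.contains_eq_listContains, PySem.Set.mem_ofList,
    PySem.List.mem_sorted]
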